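-- pv_equiv track=rewrite | github.com/ai96yuz/python-marathon | sprint01/task01.py | kthTerm
-- ===== SOURCE A (Python) =====
-- def kthTerm(n, k):
--     resultList = [1]
--     step = 0
--     while len(resultList) <= k:
--         step += 1
--         resultList.append(n ** step)
--         lenght = len(resultList) - 1
--         for i in range(0, lenght, 1):
--             resultList.append(n ** step + resultList[i])
--     return resultList[k-1]
-- ===== SOURCE B (Python) =====
-- def kthTerm(n, k):
--     # k-th term = sum of n**i over the set bits of k's binary representation
--     result = 0
--     power = 1
--     m = k
--     while m > 0:
--         if m % 2 == 1:
--             result += power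
--         power *= n
--         m //= 2
--     return result
-- ===== Notes on version B (the rewrite author's own statement) =====
-- stated objective: faster
-- what changed: Instead of materialising the whole sequence up to index k by repeatedly appending shifted copies, B computes the k-th term directly from the binary expansion of k (sum of n**i over k's set bits).
-- intended difference: At k = 0 A returns 1 (resultList[-1] wraps around to the last element of the seed list), while B returns 0, the empty bit-sum, which is the intended value for the 0-th term of a 1-indexed sequence. — e.g. on kthTerm(3, 0): A returns 1, B returns 0
import Mathlib
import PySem

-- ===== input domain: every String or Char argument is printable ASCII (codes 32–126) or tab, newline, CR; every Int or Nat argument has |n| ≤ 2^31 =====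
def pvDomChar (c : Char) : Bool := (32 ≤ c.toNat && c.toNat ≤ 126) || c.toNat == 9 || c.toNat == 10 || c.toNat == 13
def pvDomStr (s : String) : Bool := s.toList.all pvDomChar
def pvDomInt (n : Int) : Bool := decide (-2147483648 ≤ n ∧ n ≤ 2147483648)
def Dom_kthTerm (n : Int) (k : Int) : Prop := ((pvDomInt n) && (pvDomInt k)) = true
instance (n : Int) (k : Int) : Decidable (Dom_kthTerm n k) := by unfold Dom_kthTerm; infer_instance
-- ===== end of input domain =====

-- B computes the k-th term directly from the binary expansion of k (sum of n^i over k's set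
-- bits) instead of materialising the whole sequence up to index k: asymptotically faster.

-- ===== PORT A =====
-- Python's list is ported as an Array so that .append is constant-time as in Python;
-- pyAGet? is exactly Python's a[i] on it (negative index from the end, none = IndexError),
-- built from the same PySem.List.pyIdx? primitive
def pyAGet? (a : Array Int) (i : Int) : Option Int :=
  (PySem.List.pyIdx? a.size i).bind fun j => a[j]?

-- the while-loop of A; `n ** step` is ported as `n ^ step.toNat` (step is 0,1,2,… here);
-- `resultList[i]` inside the for-loop reads the evolving list, as in Python; the fuel
-- parameter only makes the while-loop total (see kthTerm below), it changes nothing else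
def kthTermLoop (n k : Int) (fuel : Nat) (resultList : Array Int) (step : Int) : Array Int :=
  match fuel with
  | 0 => resultList
  | fuel + 1 =>
    if (resultList.size : Int) ≤ k then
      let step' := step + 1
      let rl1 := resultList.push (n ^ step'.toNat)
      let lenght : Int := (rl1.size : Int) - 1
      let rl2 := (PySem.List.pyRange 0 lenght).foldl
        (fun a i => a.push (n ^ step'.toNat + (pyAGet? a i).getD 0)) rl1
      kthTermLoop n k fuel rl2 step'
    else resultList

-- fuel k.toNat + 1 is enough: the list grows by at least one element per iteration starting
-- from length 1, so the while-guard `len(resultList) <= k` fails before the fuel runs out.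
-- `(… ).getD 0` is only reached where the Python raises IndexError, i.e. for k ≤ -1,
-- which Pre_kthTerm excludes (for k = 0 the index -1 wraps to the last element as in Python).
def kthTerm (n : Int) (k : Int) : Int :=
  let resultList : Array Int := #[1]
  let step : Int := 0
  (pyAGet? (kthTermLoop n k (k.toNat + 1) resultList step) (k - 1)).getD 0

-- ===== PORT B =====
-- the while-loop of B; the fuel only makes the loop total: m at least halves each iteration,
-- so m reaches 0 well within k.toNat + 1 steps
def kthTermAltLoop (n : Int) (fuel : Nat) (m power result : Int) : Int :=
  match fuel with
  | 0 => result
  | fuel + 1 =>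
    if m > 0 then
      kthTermAltLoop n fuel (PySem.Int.floordiv m 2) (power * n)
        (if PySem.Int.mod m 2 = 1 then result + power else result)
    else result

def kthTerm_alt (n : Int) (k : Int) : Int := kthTermAltLoop n (k.toNat + 1) k 1 0

-- ===== PRECONDITION & SPEC =====
-- Pre_ excludes exactly k ≤ -1, where A raises IndexError (resultList[k-1] out of range).
def Pre_kthTerm (n : Int) (k : Int) : Prop := 0 ≤ k
instance (n : Int) (k : Int) : Decidable (Pre_kthTerm n k) := by unfold Pre_kthTerm; infer_instance
def pvWitness_kthTerm : Int × Int := (3, 5)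

-- At k = 0 A returns 1 (resultList[-1] wraps around to the last element of the seed list [1]),
-- while B returns 0, the empty bit-sum — the intended value for the 0-th term of a 1-indexed sequence.
def D_kthTerm (n : Int) (k : Int) : Prop := k = 0
instance (n : Int) (k : Int) : Decidable (D_kthTerm n k) := by unfold D_kthTerm; infer_instance

def Spec_kthTerm (n : Int) (k : Int) (out : Int) : Prop := ¬ D_kthTerm n k → out = kthTerm_alt n k
instance (n : Int) (k : Int) (out : Int) : Decidable (Spec_kthTerm n k out) := by
  unfold Spec_kthTerm; infer_instance

def pvDiffWitness_kthTerm : Int × Int := (3, 0)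
def pvDiffWitnessOut_kthTerm : Int × Int := (1, 0)

-- ===== CLAIM (what is proved, stated in full; the proofs are below) =====
def Claim_unchanged_kthTerm : Prop :=
  ∀ (n : Int) (k : Int), Dom_kthTerm n k → Pre_kthTerm n k → Spec_kthTerm n k (kthTerm n k)
def Claim_changed_kthTerm : Prop :=
  Dom_kthTerm (pvDiffWitness_kthTerm.1) (pvDiffWitness_kthTerm.2) ∧
  Pre_kthTerm (pvDiffWitness_kthTerm.1) (pvDiffWitness_kthTerm.2) ∧
  D_kthTerm (pvDiffWitness_kthTerm.1) (pvDiffWitness_kthTerm.2) ∧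
  kthTerm (pvDiffWitness_kthTerm.1) (pvDiffWitness_kthTerm.2) = pvDiffWitnessOut_kthTerm.1 ∧
  kthTerm_alt (pvDiffWitness_kthTerm.1) (pvDiffWitness_kthTerm.2) = pvDiffWitnessOut_kthTerm.2 ∧
  pvDiffWitnessOut_kthTerm.1 ≠ pvDiffWitnessOut_kthTerm.2
def Claim_exact_kthTerm : Prop :=
  ∀ (n : Int) (k : Int), Dom_kthTerm n k → Pre_kthTerm n k → D_kthTerm n k →
    kthTerm n k ≠ kthTerm_alt n k

-- ===== LEMMAS AND PROOFS =====

-- list mirror of the array-valued loop, used only by the proofs below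
def kthTermLoopL (n k : Int) (fuel : Nat) (resultList : List Int) (step : Int) : List Int :=
  match fuel with
  | 0 => resultList
  | fuel + 1 =>
    if (resultList.length : Int) ≤ k then
      let step' := step + 1
      let rl1 := resultList ++ [n ^ step'.toNat]
      let lenght : Int := (rl1.length : Int) - 1
      let rl2 := (PySem.List.pyRange 0 lenght).foldl
        (fun a i => a ++ [n ^ step'.toNat + (PySem.List.pyGet? a i).getD 0]) rl1
      kthTermLoopL n k fuel rl2 step'
    else resultList

theorem pyAGet?_eq (a : Array Int) (i : Int) : pyAGet? a i = PySem.List.pyGet? a.toList i := by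
  simp [pyAGet?, PySem.List.pyGet?, Array.length_toList, Array.getElem?_toList]

theorem foldA_toList (v : Int) : ∀ (l : List Int) (a : Array Int),
    (l.foldl (fun b i => b.push (v + (pyAGet? b i).getD 0)) a).toList
      = l.foldl (fun b i => b ++ [v + (PySem.List.pyGet? b i).getD 0]) a.toList := by
  intro l
  induction l with
  | nil => intro a; rfl
  | cons x l ih =>
    intro a
    rw [List.foldl_cons, List.foldl_cons, ih, pyAGet?_eq, Array.toList_push]

theorem loopA_toList (n k : Int) : ∀ (f : Nat) (a : Array Int) (s : Int),
    (kthTermLoop n k f a s).toList = kthTermLoopL n k f a.toList s := by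
  intro f
  induction f with
  | zero => intro a s; rfl
  | succ f ih =>
    intro a s
    rw [kthTermLoop, kthTermLoopL]
    by_cases h : ((a.size : Int)) ≤ k
    · simp only [Array.length_toList, if_pos h, ih, foldA_toList, Array.toList_push,
        Array.size_push, List.length_append, List.length_singleton]
    · simp only [Array.length_toList, if_neg h]

-- the value whose base-n "digits" are the binary digits of m: bs n m = Σ n^i over set bits of m
def bs (n : Int) (m : Nat) : Int :=
  if h : m = 0 then 0 else ((m % 2 : Nat) : Int) + n * bs n (m / 2)
termination_by m
decreasing_by exact Nat.div_lt_self (Nat.pos_of_ne_zero h) Nat.one_lt_two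

theorem bs_zero (n : Int) : bs n 0 = 0 := by rw [bs]; simp

theorem bs_pos (n : Int) (m : Nat) (h : m ≠ 0) :
    bs n m = ((m % 2 : Nat) : Int) + n * bs n (m / 2) := by rw [bs]; simp [h]

theorem bs_one (n : Int) : bs n 1 = 1 := by
  rw [bs_pos n 1 (by omega)]; simp [bs_zero]

theorem altLoop_eq (n : Int) : ∀ (f m : Nat), m < f → ∀ (p r : Int),
    kthTermAltLoop n f (m : Int) p r = r + p * bs n m := by
  intro f
  induction f with
  | zero => omega
  | succ f ih =>
    intro m hm p r
    rw [kthTermAltLoop]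
    by_cases h : m = 0
    · subst h; simp [bs_zero]
    · have hpos : (m : Int) > 0 := by exact_mod_cast Nat.pos_of_ne_zero h
      have hfd : PySem.Int.floordiv (m : Int) 2 = ((m / 2 : Nat) : Int) := by
        exact_mod_cast PySem.Int.floordiv_natCast m 2
      have hmd : PySem.Int.mod (m : Int) 2 = ((m % 2 : Nat) : Int) := by
        exact_mod_cast PySem.Int.mod_natCast m 2
      rw [if_pos hpos, hfd, hmd, ih (m / 2) (by omega), bs_pos n m h]
      rcases Nat.mod_two_eq_zero_or_one m with h2 | h2 <;> rw [h2] <;> push_cast <;>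
        ring_nf <;> simp <;> ring

theorem alt_eq_bs (n k : Int) (hk : 0 ≤ k) : kthTerm_alt n k = bs n k.toNat := by
  have h := altLoop_eq n (k.toNat + 1) k.toNat (by omega) 1 0
  rw [Int.toNat_of_nonneg hk] at h
  rw [kthTerm_alt, h]
  ring

theorem bs_pow (n : Int) : ∀ e : Nat, bs n (2 ^ e) = n ^ e := by
  intro e
  induction e with
  | zero => simp only [pow_zero]; rw [bs_pos n 1 (by omega)]; simp [bs_zero]
  | succ e ih =>
    rw [bs_pos n (2 ^ (e + 1)) (by positivity)]
    have h1 : 2 ^ (e + 1) % 2 = 0 := by omega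
    have h2 : 2 ^ (e + 1) / 2 = 2 ^ e := by omega
    rw [h1, h2, ih]; push_cast; ring

theorem bs_add_pow (n : Int) : ∀ (e t : Nat), 0 < t → t < 2 ^ e →
    bs n (2 ^ e + t) = n ^ e + bs n t := by
  intro e
  induction e with
  | zero => intro t h1 h2; omega
  | succ e ih =>
    intro t h1 h2
    rw [bs_pos n (2 ^ (e + 1) + t) (by positivity)]
    have hm : (2 ^ (e + 1) + t) % 2 = t % 2 := by omega
    have hd : (2 ^ (e + 1) + t) / 2 = 2 ^ e + t / 2 := by omega
    rw [hm, hd]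
    by_cases h0 : t / 2 = 0
    · -- t = 1
      have ht : t = 1 := by omega
      subst ht
      rw [h0, Nat.add_zero, bs_pow, bs_pos n 1 (by omega)]
      simp [bs_zero]; ring
    · rw [ih (t / 2) (by omega) (by omega), bs_pos n t (by omega)]
      push_cast; ring

-- the list A maintains: entry j holds bs n (j+1)
def tbl (n : Int) (L : Nat) : List Int := (List.range L).map (fun j => bs n (j + 1))

theorem tbl_length (n : Int) (L : Nat) : (tbl n L).length = L := by simp [tbl]

theorem tbl_succ (n : Int) (L : Nat) : tbl n (L + 1) = tbl n L ++ [bs n (L + 1)] := by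
  simp [tbl, List.range_succ]

theorem tbl_add (n : Int) (L c : Nat) :
    tbl n (L + c) = tbl n L ++ (List.range c).map (fun i => bs n (L + i + 1)) := by
  unfold tbl
  rw [List.range_add, List.map_append, List.map_map]
  rfl

theorem tbl_getElem (n : Int) (L j : Nat) (h : j < L) :
    (tbl n L)[j]? = some (bs n (j + 1)) := by
  simp [tbl, List.getElem?_map, List.getElem?_range h]

-- the inner for-loop reads only indices below the initial length, so it equals a map snapshot
theorem fold_snapshot (v : Int) (base : List Int) :
    ∀ (c : Nat) (extra : List Int), c ≤ base.length →
      (((List.range c).map (Nat.cast : Nat → Int)).foldl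
          (fun a i => a ++ [v + (PySem.List.pyGet? a i).getD 0]) (base ++ extra))
        = base ++ extra ++ (List.range c).map (fun i => v + base[i]!) := by
  intro c
  induction c with
  | zero => intro extra _; simp
  | succ c ih =>
    intro extra hc
    rw [List.range_succ, List.map_append, List.foldl_append, ih extra (by omega)]
    have hget : PySem.List.pyGet? (base ++ (extra ++ (List.range c).map
        (fun i => v + base[i]!))) ((c : Nat) : Int) = some base[c]! := by
      rw [PySem.List.pyGet?_natCast]
      have hcl : c < base.length := by omega
      rw [List.getElem?_append_left hcl,
        List.getElem?_eq_getElem hcl, List.getElem!_eq_getElem?_getD,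
        List.getElem?_eq_getElem hcl]
      simp
    simp only [List.foldl_cons, List.foldl_nil, hget, List.map_append, List.map_cons,
      List.map_nil, Option.getD_some, List.append_assoc]

-- one unfolding of the while-loop body, on a table of length 2^(s+1)-1
theorem loop_step (n k : Int) (f : Nat) (s : Nat)
    (h : ((tbl n (2 ^ (s + 1) - 1)).length : Int) ≤ k) :
    kthTermLoopL n k (f + 1) (tbl n (2 ^ (s + 1) - 1)) (s : Int)
      = kthTermLoopL n k f (tbl n (2 ^ (s + 2) - 1)) ((s + 1 : Nat) : Int) := by
  have hp1 : (1 : Nat) ≤ 2 ^ (s + 1) := Nat.one_le_two_pow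
  have hstep : ((s : Int) + 1).toNat = s + 1 := by omega
  have hrl1 : tbl n (2 ^ (s + 1) - 1) ++ [n ^ (s + 1)] = tbl n (2 ^ (s + 1)) := by
    have h1 : 2 ^ (s + 1) = (2 ^ (s + 1) - 1) + 1 := by omega
    rw [h1, tbl_succ, ← h1, bs_pow]
  have hc : ((tbl n (2 ^ (s + 1))).length : Int) - 1 = ((2 ^ (s + 1) - 1 : Nat) : Int) := by
    rw [tbl_length]; omega
  have hfold := fold_snapshot (n ^ (s + 1)) (tbl n (2 ^ (s + 1))) (2 ^ (s + 1) - 1) []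
    (by rw [tbl_length]; omega)
  rw [List.append_nil] at hfold
  have hmap : (List.range (2 ^ (s + 1) - 1)).map (fun i => n ^ (s + 1) + (tbl n (2 ^ (s + 1)))[i]!)
      = (List.range (2 ^ (s + 1) - 1)).map (fun i => bs n (2 ^ (s + 1) + i + 1)) := by
    apply List.map_congr_left
    intro i hi
    rw [List.mem_range] at hi
    have hiL : i < 2 ^ (s + 1) := by omega
    rw [List.getElem!_eq_getElem?_getD, tbl_getElem n _ i hiL, Option.getD_some,
      Nat.add_assoc, bs_add_pow n (s + 1) (i + 1) (by omega) (by omega)]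
  have htbl : tbl n (2 ^ (s + 1)) ++ (List.range (2 ^ (s + 1) - 1)).map
      (fun i => bs n (2 ^ (s + 1) + i + 1)) = tbl n (2 ^ (s + 2) - 1) := by
    rw [← tbl_add]
    congr 1
    have : 2 ^ (s + 2) = 2 * 2 ^ (s + 1) := by ring
    omega
  rw [kthTermLoopL, if_pos h]
  simp only [hstep, hrl1, hc, PySem.List.pyRange_zero_natCast, hfold, hmap, htbl]
  norm_cast

-- the loop turns a table into a longer table whose length exceeds k
theorem loop_table (n k : Int) : ∀ (f : Nat) (s : Nat),
    (k + 1 - ((2 : Int) ^ (s + 1) - 1)).toNat ≤ f →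
    ∃ L : Nat, kthTermLoopL n k f (tbl n (2 ^ (s + 1) - 1)) (s : Int) = tbl n L ∧
      k < (L : Int) ∧ 0 < L := by
  intro f
  induction f with
  | zero =>
    intro s hM
    have hp1 : (1 : Nat) ≤ 2 ^ (s + 1) := Nat.one_le_two_pow
    have hcast : ((2 ^ (s + 1) : Nat) : Int) = (2 : Int) ^ (s + 1) := by push_cast; ring
    exact ⟨2 ^ (s + 1) - 1, rfl, by omega, by omega⟩
  | succ f ih =>
    intro s hM
    have hp1 : (1 : Nat) ≤ 2 ^ (s + 1) := Nat.one_le_two_pow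
    have hcast : ((2 ^ (s + 1) : Nat) : Int) = (2 : Int) ^ (s + 1) := by push_cast; ring
    have hcast2 : ((2 ^ (s + 2) : Nat) : Int) = (2 : Int) ^ (s + 2) := by push_cast; ring
    have hdbl : (2 : Nat) ^ (s + 2) = 2 * 2 ^ (s + 1) := by ring
    by_cases hle : ((tbl n (2 ^ (s + 1) - 1)).length : Int) ≤ k
    · rw [loop_step n k f s hle]
      exact ih (s + 1) (by rw [tbl_length] at hle; omega)
    · rw [kthTermLoopL, if_neg hle]
      rw [tbl_length] at hle
      exact ⟨2 ^ (s + 1) - 1, rfl, by omega, by omega⟩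

theorem kthTerm_eq_bs (n k : Int) (hk : 1 ≤ k) : kthTerm n k = bs n k.toNat := by
  have h0 : tbl n (2 ^ (0 + 1) - 1) = [1] := by
    simp [tbl, List.range_succ, bs_one]
  obtain ⟨L, hL, hkL, hLpos⟩ := loop_table n k (k.toNat + 1) 0 (by omega)
  rw [h0] at hL
  show (pyAGet? (kthTermLoop n k (k.toNat + 1) #[1] 0) (k - 1)).getD 0 = bs n k.toNat
  have ha : (#[1] : Array Int).toList = [1] := rfl
  rw [pyAGet?_eq, loopA_toList, ha]
  have hz : ((0 : Nat) : Int) = (0 : Int) := by norm_num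
  rw [← hz, hL]
  have hidx : k - 1 = (((k - 1).toNat : Nat) : Int) := by omega
  have hjL : (k - 1).toNat < L := by omega
  rw [hidx, PySem.List.pyGet?_natCast, tbl_getElem n L _ hjL, Option.getD_some]
  congr 1
  omega

theorem kthTerm_at_zero (n : Int) : kthTerm n 0 = 1 := by
  show (pyAGet? (kthTermLoop n 0 1 #[1] 0) (0 - 1)).getD 0 = 1
  have ha : (#[1] : Array Int).toList = [1] := rfl
  rw [pyAGet?_eq, loopA_toList, ha, kthTermLoopL]
  norm_num [PySem.List.pyGet?_neg_one]

-- ===== VERDICT (by name: the statements are the Claim_ definitions above) =====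
theorem kthTerm_spec : Claim_unchanged_kthTerm := by
  intro n k _ hpre hd
  have hk : 1 ≤ k := by
    unfold Pre_kthTerm at hpre; unfold D_kthTerm at hd; omega
  rw [kthTerm_eq_bs n k hk, alt_eq_bs n k (by omega)]

theorem kthTerm_changed : Claim_changed_kthTerm := by
  unfold Claim_changed_kthTerm
  refine ⟨by decide, by decide, by decide, kthTerm_at_zero 3, ?_, by decide⟩
  show kthTerm_alt 3 0 = 0
  rw [alt_eq_bs 3 0 (by norm_num)]
  simp [bs_zero]

theorem kthTerm_tight : Claim_exact_kthTerm := by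
  intro n k _ hpre hd
  unfold D_kthTerm at hd; subst hd
  rw [kthTerm_at_zero, alt_eq_bs n 0 (by omega)]
  simp [bs_zero]
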